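-- pv_equiv track=rewrite | github.com/yingzhuo1994/AlgoExpert | assessments/BuildFailures.py | binarySearchForFirstFalse
-- ===== SOURCE A (Python) =====
-- def binarySearchForFirstFalse(array, leftIdx, rightIdx):
--     if leftIdx > rightIdx:
--         return -1
--
--     middleIdx = (leftIdx + rightIdx) // 2
--     isFalse = not array[middleIdx]
--     if isFalse:
--         isFirstFalse = middleIdx == 0 or array[middleIdx - 1]
--         if isFirstFalse:
--             return middleIdx
--         else:
--             return binarySearchForFirstFalse(array, leftIdx, middleIdx - 1)
--     else:
--         return binarySearchForFirstFalse(array, middleIdx + 1, rightIdx)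
-- ===== SOURCE B (Python) =====
-- def binarySearchForFirstFalse(array, leftIdx, rightIdx):
--     lo, hi = leftIdx, rightIdx
--     while lo <= hi:
--         mid = lo + (hi - lo) // 2
--         if array[mid]:
--             lo = mid + 1
--         elif mid == 0 or array[mid - 1]:
--             return mid
--         else:
--             hi = mid - 1
--     return -1
-- ===== Notes on version B (the rewrite author's own statement) =====
-- stated objective: idiomatic
-- what changed: Replaces the recursive binary search by an iterative lo/hi loop with an overflow-safe midpoint (lo + (hi - lo) // 2) and reordered branches with early return.
-- outside the precondition, e.g. on binarySearchForFirstFalse([True], -2, 0): A returns -1, B returns -1; on binarySearchForFirstFalse([True], -5, -5): A raises IndexError, B raises IndexError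
import Mathlib
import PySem

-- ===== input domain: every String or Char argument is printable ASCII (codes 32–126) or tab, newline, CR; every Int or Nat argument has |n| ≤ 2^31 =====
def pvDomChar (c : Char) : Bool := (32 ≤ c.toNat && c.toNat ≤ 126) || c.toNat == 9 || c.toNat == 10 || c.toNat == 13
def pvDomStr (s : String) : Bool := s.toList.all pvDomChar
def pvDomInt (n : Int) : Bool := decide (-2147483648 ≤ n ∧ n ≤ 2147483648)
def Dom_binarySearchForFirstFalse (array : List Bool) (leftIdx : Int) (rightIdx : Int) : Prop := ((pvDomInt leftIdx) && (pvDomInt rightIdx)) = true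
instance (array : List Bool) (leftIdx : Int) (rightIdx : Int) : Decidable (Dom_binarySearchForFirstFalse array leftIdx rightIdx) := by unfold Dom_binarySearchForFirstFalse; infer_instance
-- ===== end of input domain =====

-- B replaces A's recursion by an iterative lo/hi loop with an overflow-safe midpoint (idiomatic; same probe sequence, O(1) space).

-- ===== PORT A =====
def binarySearchForFirstFalse (array : List Bool) (leftIdx : Int) (rightIdx : Int) : Int :=
  if leftIdx > rightIdx then -1
  else
    let middleIdx := PySem.Int.floordiv (leftIdx + rightIdx) 2
    let isFalse := ! PySem.List.pyGetD array middleIdx false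
    if isFalse then
      let isFirstFalse := middleIdx == 0 || PySem.List.pyGetD array (middleIdx - 1) false
      if isFirstFalse then middleIdx
      else binarySearchForFirstFalse array leftIdx (middleIdx - 1)
    else binarySearchForFirstFalse array (middleIdx + 1) rightIdx
termination_by (rightIdx - leftIdx + 1).toNat
decreasing_by
  all_goals
    have h := PySem.Int.floordiv_two_mid_bounds (lo := leftIdx) (hi := rightIdx) (by omega)
    omega

-- ===== PORT B =====
def bsffLoop (array : List Bool) (lo : Int) (hi : Int) : Int :=
  if lo ≤ hi then
    let mid := lo + PySem.Int.floordiv (hi - lo) 2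
    if PySem.List.pyGetD array mid false then bsffLoop array (mid + 1) hi
    else if mid == 0 || PySem.List.pyGetD array (mid - 1) false then mid
    else bsffLoop array lo (mid - 1)
  else -1
termination_by (hi - lo + 1).toNat
decreasing_by
  all_goals
    have h := PySem.Int.floordiv_two_mid_bounds (lo := (0:Int)) (hi := hi - lo) (by omega)
    simp only [zero_add] at h
    omega

def binarySearchForFirstFalse_alt (array : List Bool) (leftIdx : Int) (rightIdx : Int) : Int :=
  bsffLoop array leftIdx rightIdx

-- ===== PRECONDITION & SPEC =====
-- Pre_ restricts to the binary-search contract: the range is empty, or both endpoints index into the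
-- array. Outside it the Python A either raises IndexError or returns via Python's negative-index
-- wraparound (an accident of list indexing no caller would rely on); the Python B behaves identically
-- there, but the ports (which use defaulted indexing) are only claimed on the contract.
def Pre_binarySearchForFirstFalse (array : List Bool) (leftIdx : Int) (rightIdx : Int) : Prop :=
  leftIdx > rightIdx ∨ (0 ≤ leftIdx ∧ rightIdx < array.length)
instance (array : List Bool) (leftIdx : Int) (rightIdx : Int) : Decidable (Pre_binarySearchForFirstFalse array leftIdx rightIdx) := by unfold Pre_binarySearchForFirstFalse; infer_instance

def pvWitness_binarySearchForFirstFalse : List Bool × Int × Int := ([true, true, false, false], 0, 3)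

def Spec_binarySearchForFirstFalse (array : List Bool) (leftIdx : Int) (rightIdx : Int) (out : Int) : Prop := out = binarySearchForFirstFalse_alt array leftIdx rightIdx
instance (array : List Bool) (leftIdx : Int) (rightIdx : Int) (out : Int) : Decidable (Spec_binarySearchForFirstFalse array leftIdx rightIdx out) := by unfold Spec_binarySearchForFirstFalse; infer_instance

-- ===== CLAIM (what is proved, stated in full; the proofs are below) =====
def Claim_equal_binarySearchForFirstFalse : Prop := ∀ (array : List Bool) (leftIdx : Int) (rightIdx : Int), Dom_binarySearchForFirstFalse array leftIdx rightIdx → Pre_binarySearchForFirstFalse array leftIdx rightIdx → Spec_binarySearchForFirstFalse array leftIdx rightIdx (binarySearchForFirstFalse array leftIdx rightIdx)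

-- ===== LEMMAS AND PROOFS =====

-- B's overflow-safe midpoint equals A's midpoint.
theorem bsff_mid_eq (lo hi : Int) :
    lo + PySem.Int.floordiv (hi - lo) 2 = PySem.Int.floordiv (lo + hi) 2 := by
  rw [PySem.Int.floordiv_eq_ediv_of_pos (show (0:Int) < 2 by omega),
      PySem.Int.floordiv_eq_ediv_of_pos (show (0:Int) < 2 by omega)]
  omega

theorem bsff_key (array : List Bool) : ∀ (n : Nat) (l r : Int),
    (r - l + 1).toNat ≤ n → (l > r ∨ (0 ≤ l ∧ r < array.length)) →
    binarySearchForFirstFalse array l r = bsffLoop array l r := by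
  intro n
  induction n with
  | zero =>
    intro l r hn _
    have hlr : l > r := by omega
    rw [binarySearchForFirstFalse, bsffLoop]
    simp [hlr, not_le.mpr hlr]
  | succ n ih =>
    intro l r hn hpre
    by_cases hlr : l > r
    · rw [binarySearchForFirstFalse, bsffLoop]
      simp [hlr, not_le.mpr hlr]
    · have hle : l ≤ r := by omega
      have hb : 0 ≤ l ∧ r < array.length := by
        rcases hpre with h | h
        · omega
        · exact h
      have hmid := PySem.Int.floordiv_two_mid_bounds (lo := l) (hi := r) hle
      rw [binarySearchForFirstFalse, bsffLoop]
      simp only [if_neg (not_lt.mpr hle), if_pos hle, bsff_mid_eq]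
      set m := PySem.Int.floordiv (l + r) 2 with hm
      by_cases hget : PySem.List.pyGetD array m false = true
      · simp only [hget, Bool.not_true, Bool.false_eq_true, if_false, if_true]
        exact ih (m + 1) r (by omega) (by omega)
      · simp only [Bool.not_eq_true] at hget
        simp only [hget, Bool.not_false, Bool.false_eq_true, if_false, if_true]
        by_cases hfirst : (m == 0 || PySem.List.pyGetD array (m - 1) false) = true
        · simp [hfirst]
        · simp only [hfirst, Bool.false_eq_true, if_false]
          exact ih l (m - 1) (by omega) (by omega)

-- ===== VERDICT (by name: the statement is the Claim_ definition above) =====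
theorem binarySearchForFirstFalse_spec : Claim_equal_binarySearchForFirstFalse := by
  intro array l r _ hpre
  unfold Spec_binarySearchForFirstFalse binarySearchForFirstFalse_alt
  exact bsff_key array (r - l + 1).toNat l r le_rfl hpre
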